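-- pv_equiv track=rewrite | github.com/VecsesDevComm/7_lesson | algorithms/max.py | max_by_key
-- ===== SOURCE A (Python) =====
-- def max_by_key(items, key):
--     m = [items[0]]
--     n = len(items)
--     i = 1
--
--     while i < n:
--         if items[i][key] > m[0][key]:
--             m = [items[i]]
--         elif items[i][key] == m[0][key]:
--             m.append(items[i])
--
--         i = i + 1
--
--     return m
-- ===== SOURCE B (Python) =====
-- def max_by_key(items, key):
--     best = max(item[key] for item in items)
--     return [item for item in items if item[key] == best]
-- ===== Notes on version B (the rewrite author's own statement) =====
-- stated objective: idiomatic
-- what changed: Replaces the single-pass winner-list maintenance (reset/append comparing against the running list's head) with two staged passes: max() over the key values, then a comprehension keeping the items equal to it; Pre_ excludes empty input (IndexError) and items lacking the key, where A's lone-item return without any key lookup is an accident of never entering the loop and B raises KeyError.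
-- outside the precondition, e.g. on max_by_key([{}], 'a'): A returns [{}], B raises KeyError
import Mathlib
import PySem

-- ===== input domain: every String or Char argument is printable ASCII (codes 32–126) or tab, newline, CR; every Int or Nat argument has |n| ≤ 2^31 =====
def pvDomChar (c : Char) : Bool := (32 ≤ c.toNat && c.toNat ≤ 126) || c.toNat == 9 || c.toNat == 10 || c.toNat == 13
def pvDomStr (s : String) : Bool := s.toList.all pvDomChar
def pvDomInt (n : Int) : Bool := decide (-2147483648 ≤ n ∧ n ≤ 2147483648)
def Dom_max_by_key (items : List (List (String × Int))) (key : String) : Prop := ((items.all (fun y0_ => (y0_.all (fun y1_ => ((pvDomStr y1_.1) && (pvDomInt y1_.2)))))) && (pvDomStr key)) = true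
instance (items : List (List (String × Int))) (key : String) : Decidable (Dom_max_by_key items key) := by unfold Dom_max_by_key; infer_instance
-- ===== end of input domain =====

-- B replaces A's single-pass winner-list maintenance with the idiomatic two-stage form:
-- max() over the key values, then a comprehension keeping the items equal to it; same return values.

-- dict lookup item[key]: first match; key presence is guaranteed by Pre_ (KeyError is excluded)
def pvVal (d : List (String × Int)) (key : String) : Int :=
  ((d.find? (fun p => p.1 == key)).map Prod.snd).getD 0

-- ===== PORT A =====
-- while-loop over i = 1..n-1 transcribed as a fold over the tail with the same state m
def max_by_key (items : List (List (String × Int))) (key : String) : List (List (String × Int)) :=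
  match items with
  | [] => []  -- Python raises IndexError here; excluded by Pre_
  | h :: t =>
    t.foldl (fun m x =>
      if pvVal x key > pvVal (m.headD []) key then [x]
      else if pvVal x key = pvVal (m.headD []) key then m ++ [x]
      else m) [h]

-- ===== PORT B =====
-- max(item[key] for item in items) is PySem.List.max? over the mapped key values (none = ValueError,
-- excluded by Pre_); then the comprehension is a filter.
def max_by_key_alt (items : List (List (String × Int))) (key : String) : List (List (String × Int)) :=
  match PySem.List.max? (items.map (fun d => pvVal d key)) (fun v => v) with
  | none => []  -- Python raises ValueError here; excluded by Pre_
  | some best => items.filter (fun x => pvVal x key == best)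

-- ===== PRECONDITION & SPEC =====
-- Pre_ excludes empty input (A raises IndexError, B ValueError) and lists with an item lacking the key:
-- there A raises KeyError, except that on a single-element list A accidentally returns [items[0]] without
-- ever looking the key up (the loop never runs) while B's max() pass raises KeyError, so those inputs are
-- excluded too.
def Pre_max_by_key (items : List (List (String × Int))) (key : String) : Prop :=
  items ≠ [] ∧ ∀ d ∈ items, key ∈ d.map Prod.fst
instance (items : List (List (String × Int))) (key : String) : Decidable (Pre_max_by_key items key) := by unfold Pre_max_by_key; infer_instance

def pvWitness_max_by_key : (List (List (String × Int))) × String :=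
  ([[("k", 2), ("z", 0)], [("k", 1)], [("k", 2)]], "k")

def Spec_max_by_key (items : List (List (String × Int))) (key : String) (out : List (List (String × Int))) : Prop := out = max_by_key_alt items key
instance (items : List (List (String × Int))) (key : String) (out : List (List (String × Int))) : Decidable (Spec_max_by_key items key out) := by unfold Spec_max_by_key; infer_instance

-- ===== CLAIM (what is proved, stated in full; the proofs are below) =====
def Claim_equal_max_by_key : Prop := ∀ (items : List (List (String × Int))) (key : String), Dom_max_by_key items key → Pre_max_by_key items key → Spec_max_by_key items key (max_by_key items key)

-- ===== LEMMAS AND PROOFS =====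

-- the running maximum of the key values, in A's loop-step form
def pvBest (key : String) (b : Int) (t : List (List (String × Int))) : Int :=
  t.foldl (fun b x => if pvVal x key > b then pvVal x key else b) b

theorem pvBest_le (key : String) (b : Int) (t : List (List (String × Int))) :
    b ≤ pvBest key b t := by
  induction t generalizing b with
  | nil => simp [pvBest]
  | cons x xs ih =>
    simp only [pvBest, List.foldl_cons]
    split_ifs with h
    · exact le_of_lt (lt_of_lt_of_le h (ih _))
    · exact ih _

-- A's loop maintains exactly "the filter of the processed part by the running maximum"
theorem pvLoop_eq (key : String) (t : List (List (String × Int)))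
    (b : Int) (m : List (List (String × Int))) (hm : m ≠ []) (hb : pvVal (m.headD []) key = b) :
    t.foldl (fun m x =>
      if pvVal x key > pvVal (m.headD []) key then [x]
      else if pvVal x key = pvVal (m.headD []) key then m ++ [x]
      else m) m
    = if pvBest key b t > b then t.filter (fun x => pvVal x key == pvBest key b t)
      else m ++ t.filter (fun x => pvVal x key == b) := by
  induction t generalizing b m with
  | nil => simp [pvBest]
  | cons x xs ih =>
    have hBcons : ∀ c : Int, pvBest key c (x :: xs)
        = pvBest key (if pvVal x key > c then pvVal x key else c) xs := fun c => rfl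
    simp only [List.foldl_cons, hb]
    rcases lt_trichotomy b (pvVal x key) with hlt | heq | hgt
    · rw [if_pos hlt]
      rw [ih (pvVal x key) [x] (by simp) (by simp)]
      have hB : pvBest key b (x :: xs) = pvBest key (pvVal x key) xs := by
        rw [hBcons, if_pos hlt]
      have hle : pvVal x key ≤ pvBest key (pvVal x key) xs := pvBest_le _ _ _
      have hgtb : pvBest key b (x :: xs) > b := lt_of_lt_of_le hlt (hB ▸ hle)
      rw [if_pos hgtb, hB]
      rcases lt_or_eq_of_le hle with h2 | h2
      · rw [if_pos h2, List.filter_cons_of_neg (by simp; omega)]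
      · rw [if_neg (by omega), List.filter_cons_of_pos (by simp [← h2]),
            List.singleton_append, ← h2]
    · rw [if_neg (by omega), if_pos heq.symm]
      rw [ih b (m ++ [x]) (by simp) (by cases m with
        | nil => exact absurd rfl hm
        | cons a l => simpa using hb)]
      have hB : pvBest key b (x :: xs) = pvBest key b xs := by
        rw [hBcons, if_neg (by omega)]
      rw [hB]
      by_cases hc : pvBest key b xs > b
      · rw [if_pos hc, if_pos hc, List.filter_cons_of_neg (by simp; omega)]
      · rw [if_neg hc, if_neg hc, List.filter_cons_of_pos (by simp [heq]),
            List.append_assoc, List.singleton_append]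
    · rw [if_neg (by omega), if_neg (by omega)]
      rw [ih b m hm hb]
      have hB : pvBest key b (x :: xs) = pvBest key b xs := by
        rw [hBcons, if_neg (by omega)]
      rw [hB]
      by_cases hc : pvBest key b xs > b
      · rw [if_pos hc, if_pos hc, List.filter_cons_of_neg (by simp; omega)]
      · rw [if_neg hc, if_neg hc, List.filter_cons_of_neg (by simp; omega)]

-- A's loop-step running max is the plain foldl of `max` over the key values
theorem pvBest_eq_foldl_max (key : String) (b : Int) (t : List (List (String × Int))) :
    pvBest key b t = (t.map (fun d => pvVal d key)).foldl max b := by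
  induction t generalizing b with
  | nil => simp [pvBest]
  | cons x xs ih =>
    simp only [pvBest, List.foldl_cons, List.map_cons] at *
    rw [ih, show (if pvVal x key > b then pvVal x key else b) = max b (pvVal x key) from by
      split_ifs with h <;> omega]

-- B's max() of the key values is A's running maximum
theorem pvMax?_eq (key : String) (h : List (String × Int)) (t : List (List (String × Int))) :
    PySem.List.max? ((h :: t).map (fun d => pvVal d key)) (fun v => v)
      = some (pvBest key (pvVal h key) t) := by
  rw [List.map_cons, PySem.List.max?_id_cons, pvBest_eq_foldl_max]

-- ===== VERDICT (by name: the statement is the Claim_ definition above) =====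
theorem max_by_key_spec : Claim_equal_max_by_key := by
  intro items key _ hpre
  unfold Spec_max_by_key
  cases items with
  | nil => exact absurd rfl hpre.1
  | cons h t =>
    have hB : max_by_key_alt (h :: t) key
        = (h :: t).filter (fun x => pvVal x key == pvBest key (pvVal h key) t) := by
      unfold max_by_key_alt; rw [pvMax?_eq]
    rw [hB]
    show (t.foldl (fun m x =>
        if pvVal x key > pvVal (m.headD []) key then [x]
        else if pvVal x key = pvVal (m.headD []) key then m ++ [x]
        else m) [h]) = _
    rw [pvLoop_eq key t (pvVal h key) [h] (by simp) (by simp)]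
    have hge : pvVal h key ≤ pvBest key (pvVal h key) t := pvBest_le _ _ _
    by_cases hc : pvBest key (pvVal h key) t > pvVal h key
    · rw [if_pos hc, List.filter_cons_of_neg (by simp; omega)]
    · have hEq : pvBest key (pvVal h key) t = pvVal h key := le_antisymm (not_lt.mp hc) hge
      rw [if_neg hc, List.filter_cons_of_pos (by simp [hEq]), List.singleton_append, hEq]
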